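/- GENERATED by farm/worked/mk_tree_copies.py from farm/worked/stb_vorbis_get_frame_float.COMPOSITION/Proof.lean (a worked proof of the farm's unit `stb_vorbis_get_frame_float.COMPOSITION`,
   accepted by the verdict) — do not edit. -/
import Vorbis.Spec.Units.stb_vorbis_get_frame_float_COMPOSITION

/- THE COMPOSITION OF stb_vorbis_get_frame_float (in the farm's format): the six segment statements give the function's contract, by
   `ReachVia.trans` and, for the loop `for (i = 0; i < f->channels; ++i)`, an induction on the measure `ch − i` that the head's
   assertion bounds (`AtLoop.i_le`: the exit `AtLoop (i + 1)` of one round asserts `i + 1 ≤ ch`). No machine code is walked. -/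
open X86 X86.User Asan Vorbis Vorbis.Spec

namespace Vorbis.Spec.Worked.stb_vorbis_get_frame_float_COMPOSITION
open Vorbis.Spec.stb_vorbis_get_frame_float_COMPOSITION (Statement)

/-- From the epilogue's head the function returns: segment 6. -/
theorem gff_from_epi_w {Lay : Layout} {μ : Microarch} {u₀ : State}
    (hseg6 : stb_vorbis_get_frame_float.Seg6 Lay μ u₀)
    (others : List Obj) (frames : List (Nat × FrameLayout)) (len : Nat) (A : Arena) (stored room : Int) (ysz : Nat → Nat)
    (u : State) (ret : Word) (f r : Nat) (v : State)
    (hv : stb_vorbis_get_frame_float.AtEpi others frames len A stored room ysz u₀ u ret f r v) :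
    ReachVia Lay μ WayInv v
      (Returned (conv u₀) (stb_vorbis_get_frame_float.spec others frames len A stored room ysz) u ret) :=
  hseg6 others frames len A stored room ysz u ret f r v hv

/-- From the loop's exit the function returns: segment 5 (the four checked stores), then the epilogue. -/
theorem gff_from_stores_w {Lay : Layout} {μ : Microarch} {u₀ : State}
    (hseg5 : stb_vorbis_get_frame_float.Seg5 Lay μ u₀) (hseg6 : stb_vorbis_get_frame_float.Seg6 Lay μ u₀)
    (others : List Obj) (frames : List (Nat × FrameLayout)) (len : Nat) (A : Arena) (stored room : Int) (ysz : Nat → Nat)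
    (u : State) (ret : Word) (f left r ch : Nat) (v : State)
    (hv : stb_vorbis_get_frame_float.AtStores others frames len A stored room ysz u₀ u ret f left r ch v) :
    ReachVia Lay μ WayInv v
      (Returned (conv u₀) (stb_vorbis_get_frame_float.spec others frames len A stored room ysz) u ret) := by
  apply (hseg5 others frames len A stored room ysz u ret f left r ch v hv).trans
  intro w hw
  exact gff_from_epi_w hseg6 others frames len A stored room ysz u ret f r w hw

/-- From the loop head at `i` the function returns: induction on `n ≥ ch − i`. One round (segment 4) ends at the head at `i + 1`,
whose assertion says `i + 1 ≤ ch`, so `ch − (i + 1) < ch − i`; or at the loop's exit. -/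
theorem gff_from_loop_w {Lay : Layout} {μ : Microarch} {u₀ : State}
    (hseg4 : stb_vorbis_get_frame_float.Seg4 Lay μ u₀) (hseg5 : stb_vorbis_get_frame_float.Seg5 Lay μ u₀)
    (hseg6 : stb_vorbis_get_frame_float.Seg6 Lay μ u₀)
    (others : List Obj) (frames : List (Nat × FrameLayout)) (len : Nat) (A : Arena) (stored room : Int) (ysz : Nat → Nat)
    (u : State) (ret : Word) (f left r ch : Nat) :
    ∀ (n i : Nat) (v : State), ch - i ≤ n →
      stb_vorbis_get_frame_float.AtLoop others frames len A stored room ysz u₀ u ret f left r ch i v →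
      ReachVia Lay μ WayInv v
        (Returned (conv u₀) (stb_vorbis_get_frame_float.spec others frames len A stored room ysz) u ret) := by
  intro n
  induction n with
  | zero =>
    intro i v hn hv
    apply (hseg4 others frames len A stored room ysz u ret f left r ch i v hv).trans
    intro w hw
    rcases hw with hnext | hexit
    · have hle := hnext.i_le
      omega
    · exact gff_from_stores_w hseg5 hseg6 others frames len A stored room ysz u ret f left r ch w hexit
  | succ n ih =>
    intro i v hn hv
    apply (hseg4 others frames len A stored room ysz u ret f left r ch i v hv).trans
    intro w hw
    rcases hw with hnext | hexit
    · have hle := hnext.i_le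
      exact ih (i + 1) w (by omega) hnext
    · exact gff_from_stores_w hseg5 hseg6 others frames len A stored room ysz u ret f left r ch w hexit

end Vorbis.Spec.Worked.stb_vorbis_get_frame_float_COMPOSITION

theorem Vorbis.Spec.Worked.stb_vorbis_get_frame_float_COMPOSITION_ok : Vorbis.Spec.stb_vorbis_get_frame_float_COMPOSITION.Statement := by
  intro Lay hLay μ hμ u₀ hseg1 hseg2 hseg3 hseg4 hseg5 hseg6 others frames len A stored room ysz u ret he hpre
  apply (hseg1 others frames len A stored room ysz u ret he hpre).trans
  intro v1 hv1
  apply (hseg2 others frames len A stored room ysz u ret _ v1 hv1).trans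
  intro v2 hv2
  rcases hv2 with ⟨left, r, hcut2⟩ | hepi
  · apply (hseg3 others frames len A stored room ysz u ret _ left r v2 hcut2).trans
    intro v3 hv3
    obtain ⟨ch, hloop⟩ := hv3
    exact Vorbis.Spec.Worked.stb_vorbis_get_frame_float_COMPOSITION.gff_from_loop_w hseg4 hseg5 hseg6 others frames len A stored room ysz
      u ret _ left r ch _ 0 v3 (Nat.le_refl _) hloop
  · exact Vorbis.Spec.Worked.stb_vorbis_get_frame_float_COMPOSITION.gff_from_epi_w hseg6 others frames len A stored room ysz u ret _ 0 v2 hepi
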